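-- pv_equiv track=rewrite | github.com/gaoshenghanpenn/Snakemake-AssemblyRepairer | workflow/script/region_repairment.py | exchange_regions
-- ===== SOURCE A (Python) =====
-- def exchange_regions(error_regions,array_length,extend_length):
--     merge_exchange_regions = [] # 保存需要交换的区间
--     if len(error_regions) == 0:
--         return merge_exchange_regions
--     elif len(error_regions) == 1: # 当只有一个时候，不需要合并，直接延展即可
--         exchange_start = error_regions[0][0] - extend_length
--         if exchange_start < 0: # 注意不要超过array的start
--             exchange_start = 0 # 超过了就设置为array start
--         exchange_end = error_regions[0][1] + extend_length
--         if exchange_end > array_length - 1: #  注意不要超过array的end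
--             exchange_end = array_length - 1 # 超过了就设置为array end
--         merge_exchange_regions.append([exchange_start,exchange_end])
--     else: # 超过1个
--         init_exchange_region = error_regions[0] # 初始
--         for i in range(len(error_regions) - 1):
--             # ----()()-----
--             if error_regions[i+1][0] - init_exchange_region[1] <= extend_length: # 当后一个和前一个的距离小于等于
--                 init_exchange_region[1] = error_regions[i+1][1] # 进行区间合并
--             else: # 否则进行输出
--                 exchange_start = init_exchange_region[0] - extend_length
--                 if exchange_start < 0:
--                     exchange_start = 0
--                 exchange_end = init_exchange_region[1] + extend_length
--                 if exchange_end > array_length - 1: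
--                     exchange_end = array_length - 1
--                 merge_exchange_regions.append([exchange_start,exchange_end])
--                 init_exchange_region = error_regions[i+1]
--
--         exchange_start = init_exchange_region[0] - extend_length
--         if exchange_start  < 0:
--             exchange_start = 0
--         exchange_end = init_exchange_region[1] + extend_length
--         if exchange_end > array_length - 1:
--             exchange_end = array_length - 1
--         merge_exchange_regions.append([exchange_start,exchange_end])
--     return merge_exchange_regions
-- ===== SOURCE B (Python) =====
-- def exchange_regions(error_regions, array_length, extend_length):
--     # Group regions purely by ADJACENT gaps (no running merged interval is
--     # maintained): split the list before every position whose gap to the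
--     # previous region exceeds extend_length, then report each group by its
--     # first region's start and its last region's end, extended and clamped.
--     # Correct because A's running merged end always equals the previous
--     # region's end, so A's merge test is exactly the adjacent-gap test.
--     groups = []
--     rs = error_regions
--     while rs:
--         k = 0
--         while k < len(rs) - 1 and rs[k + 1][0] - rs[k][1] <= extend_length:
--             k += 1
--         groups.append(rs[:k + 1])
--         rs = rs[k + 1:]
--     return [[max(0, g[0][0] - extend_length),
--              min(array_length - 1, g[-1][1] + extend_length)]
--             for g in groups]
-- ===== Notes on version B (the rewrite author's own statement) =====
-- stated objective: alternative
-- what changed: Instead of A's index loop that maintains and mutates a running merged interval, B groups the regions purely by adjacent-pair gaps (recursively splitting the list before every gap > extend_length) and then emits each group from its first region's start and last region's end, extended and clamped; this is correct because A's running merged end always equals the previous region's end. B does not mutate error_regions (A does); the equivalence is about the return value.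
import Mathlib
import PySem

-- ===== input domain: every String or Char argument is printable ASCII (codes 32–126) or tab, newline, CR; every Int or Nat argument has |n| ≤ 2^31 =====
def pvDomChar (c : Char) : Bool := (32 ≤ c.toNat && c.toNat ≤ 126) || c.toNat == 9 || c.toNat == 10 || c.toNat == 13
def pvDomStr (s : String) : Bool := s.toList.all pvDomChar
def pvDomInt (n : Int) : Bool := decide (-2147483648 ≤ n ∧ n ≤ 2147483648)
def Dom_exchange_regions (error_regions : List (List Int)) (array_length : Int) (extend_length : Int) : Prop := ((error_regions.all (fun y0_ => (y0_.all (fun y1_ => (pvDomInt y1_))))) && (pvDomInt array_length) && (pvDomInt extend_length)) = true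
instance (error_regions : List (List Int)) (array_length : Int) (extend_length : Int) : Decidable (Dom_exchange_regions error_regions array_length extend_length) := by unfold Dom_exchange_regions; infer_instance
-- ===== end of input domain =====

-- B replaces A's running merged-interval loop by grouping the regions on adjacent-pair gaps
-- (split before every gap > extend_length) and emitting each group from its first start
-- and last end (objective: alternative). A mutates the group-head sublists of error_regions, B does
-- not: the equivalence proved here is about the RETURN value only.

-- ===== PORT A =====
def exchange_regions (error_regions : List (List Int)) (array_length : Int) (extend_length : Int) : List (List Int) :=
  let merge_exchange_regions : List (List Int) := []
  if error_regions.length = 0 then merge_exchange_regions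
  else if error_regions.length = 1 then
    let exchange_start := PySem.List.pyGetD (PySem.List.pyGetD error_regions 0 []) 0 0 - extend_length
    let exchange_start := if exchange_start < 0 then 0 else exchange_start
    let exchange_end := PySem.List.pyGetD (PySem.List.pyGetD error_regions 0 []) 1 0 + extend_length
    let exchange_end := if exchange_end > array_length - 1 then array_length - 1 else exchange_end
    merge_exchange_regions ++ [[exchange_start, exchange_end]]
  else
    let init_exchange_region := PySem.List.pyGetD error_regions 0 []
    let st := (PySem.List.pyRange 0 ((error_regions.length : Int) - 1) 1).foldl
      (fun (st : List (List Int) × List Int) i =>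
        if PySem.List.pyGetD (PySem.List.pyGetD error_regions (i + 1) []) 0 0 - PySem.List.pyGetD st.2 1 0 ≤ extend_length then
          (st.1, st.2.set 1 (PySem.List.pyGetD (PySem.List.pyGetD error_regions (i + 1) []) 1 0))
        else
          let exchange_start := PySem.List.pyGetD st.2 0 0 - extend_length
          let exchange_start := if exchange_start < 0 then 0 else exchange_start
          let exchange_end := PySem.List.pyGetD st.2 1 0 + extend_length
          let exchange_end := if exchange_end > array_length - 1 then array_length - 1 else exchange_end
          (st.1 ++ [[exchange_start, exchange_end]], PySem.List.pyGetD error_regions (i + 1) []))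
      (merge_exchange_regions, init_exchange_region)
    let exchange_start := PySem.List.pyGetD st.2 0 0 - extend_length
    let exchange_start := if exchange_start < 0 then 0 else exchange_start
    let exchange_end := PySem.List.pyGetD st.2 1 0 + extend_length
    let exchange_end := if exchange_end > array_length - 1 then array_length - 1 else exchange_end
    st.1 ++ [[exchange_start, exchange_end]]

-- ===== PORT B =====
-- Source B's while loop: number of consecutive regions whose gap to the previous one is ≤ extend_length
def pvChain (e : Int) (prev : List Int) : List (List Int) → Nat
  | [] => 0
  | r :: rs =>
    if PySem.List.pyGetD r 0 0 - PySem.List.pyGetD prev 1 0 ≤ e then pvChain e r rs + 1 else 0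

-- Source B's grouping loop: split off the maximal adjacent-gap chain, continue on the rest
def pvGroups (e : Int) : List (List Int) → List (List (List Int))
  | [] => []
  | r :: rs =>
    let k := pvChain e r rs
    (r :: rs.take k) :: pvGroups e (rs.drop k)
  termination_by rs => rs.length
  decreasing_by simp [List.length_drop]

-- Source B's comprehension body: output of one group from g[0][0] and g[-1][1]
def pvOutG (array_length extend_length : Int) (g : List (List Int)) : List Int :=
  [max 0 (PySem.List.pyGetD (PySem.List.pyGetD g 0 []) 0 0 - extend_length),
   min (array_length - 1) (PySem.List.pyGetD (PySem.List.pyGetD g (-1) []) 1 0 + extend_length)]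

def exchange_regions_alt (error_regions : List (List Int)) (array_length : Int) (extend_length : Int) : List (List Int) :=
  (pvGroups extend_length error_regions).map (pvOutG array_length extend_length)

-- ===== PRECONDITION & SPEC =====
-- Pre_ excludes exactly the inputs on which Python A raises IndexError: a region with fewer than 2 entries.
def Pre_exchange_regions (error_regions : List (List Int)) (array_length : Int) (extend_length : Int) : Prop :=
  ∀ r ∈ error_regions, 2 ≤ r.length
instance (error_regions : List (List Int)) (array_length : Int) (extend_length : Int) : Decidable (Pre_exchange_regions error_regions array_length extend_length) := by unfold Pre_exchange_regions; infer_instance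

def pvWitness_exchange_regions : List (List Int) × Int × Int := ([[1, 3], [10, 12]], 20, 2)

def Spec_exchange_regions (error_regions : List (List Int)) (array_length : Int) (extend_length : Int) (out : List (List Int)) : Prop := out = exchange_regions_alt error_regions array_length extend_length
instance (error_regions : List (List Int)) (array_length : Int) (extend_length : Int) (out : List (List Int)) : Decidable (Spec_exchange_regions error_regions array_length extend_length out) := by unfold Spec_exchange_regions; infer_instance

-- ===== CLAIM (what is proved, stated in full; the proofs are below) =====
def Claim_equal_exchange_regions : Prop := ∀ (error_regions : List (List Int)) (array_length : Int) (extend_length : Int), Dom_exchange_regions error_regions array_length extend_length → Pre_exchange_regions error_regions array_length extend_length → Spec_exchange_regions error_regions array_length extend_length (exchange_regions error_regions array_length extend_length)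

-- ===== LEMMAS AND PROOFS =====

-- A's inline clamp, factored for the proofs only
def pvClampA (array_length extend_length : Int) (iv : List Int) : List Int :=
  [(if PySem.List.pyGetD iv 0 0 - extend_length < 0 then 0 else PySem.List.pyGetD iv 0 0 - extend_length),
   (if PySem.List.pyGetD iv 1 0 + extend_length > array_length - 1 then array_length - 1
    else PySem.List.pyGetD iv 1 0 + extend_length)]

-- A's loop body, factored for the proofs only
def pvStepA (array_length extend_length : Int) (st : List (List Int) × List Int) (r : List Int) : List (List Int) × List Int :=
  if PySem.List.pyGetD r 0 0 - PySem.List.pyGetD st.2 1 0 ≤ extend_length then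
    (st.1, st.2.set 1 (PySem.List.pyGetD r 1 0))
  else
    (st.1 ++ [pvClampA array_length extend_length st.2], r)

-- A's tail computation in functional form: current open interval + remaining regions
def pvRun (array_length extend_length : Int) (cur : List Int) : List (List Int) → List (List Int)
  | [] => [pvClampA array_length extend_length cur]
  | r :: t =>
    if PySem.List.pyGetD r 0 0 - PySem.List.pyGetD cur 1 0 ≤ extend_length then
      pvRun array_length extend_length (cur.set 1 (PySem.List.pyGetD r 1 0)) t
    else
      pvClampA array_length extend_length cur :: pvRun array_length extend_length r t

lemma pvClampA_out (L e : Int) (cur : List Int) :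
    pvClampA L e cur = pvOutG L e [cur] := by
  have h1 : PySem.List.pyGetD [cur] 0 ([] : List Int) = cur := rfl
  have h2 : PySem.List.pyGetD [cur] (-1) ([] : List Int) = cur := rfl
  simp only [pvClampA, pvOutG, h1, h2, List.cons.injEq, and_true]
  constructor <;> split <;> omega

lemma pvGetD_set_one (xs : List Int) (v : Int) (h : 2 ≤ xs.length) :
    PySem.List.pyGetD (xs.set 1 v) 1 0 = v := by
  rw [PySem.List.pyGetD_eq_getElem _ _ (by omega) (by simp; omega)]
  simp

lemma pvGetD_set_zero (xs : List Int) (v : Int) :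
    PySem.List.pyGetD (xs.set 1 v) 0 0 = PySem.List.pyGetD xs 0 0 := by
  cases xs with
  | nil => rfl
  | cons a l => cases l <;> simp [PySem.List.pyGetD_zero_cons]

lemma pvChain_congr (e : Int) (p q : List Int) (t : List (List Int))
    (h : PySem.List.pyGetD p 1 0 = PySem.List.pyGetD q 1 0) :
    pvChain e p t = pvChain e q t := by
  cases t with
  | nil => rfl
  | cons r rs => simp [pvChain, h]

lemma pvLast_cons (a : List Int) (l : List (List Int)) (h : l ≠ []) :
    PySem.List.pyGetD (a :: l) (-1) ([] : List Int) = PySem.List.pyGetD l (-1) [] := by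
  rw [PySem.List.pyGetD_neg_one (a :: l) [] (by simp), PySem.List.pyGetD_neg_one l [] h]
  exact List.getLast_cons h

lemma pvRun_cons (L e : Int) (cur r : List Int) (t : List (List Int)) :
    pvRun L e cur (r :: t) =
      if PySem.List.pyGetD r 0 0 - PySem.List.pyGetD cur 1 0 ≤ e then
        pvRun L e (cur.set 1 (PySem.List.pyGetD r 1 0)) t
      else pvClampA L e cur :: pvRun L e r t := rfl

lemma pvGroups_nil (e : Int) : pvGroups e [] = [] := by
  unfold pvGroups
  rfl

lemma pvGroups_cons (e : Int) (r : List Int) (rs : List (List Int)) :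
    pvGroups e (r :: rs)
      = (r :: rs.take (pvChain e r rs)) :: pvGroups e (rs.drop (pvChain e r rs)) := by
  conv_lhs => unfold pvGroups

-- shifting the index loop: range(0, n-1) accessing i+1 = range(1, n) accessing i
lemma pvShift {α : Type} (n : Int) (G : α → Int → α) (init : α) :
    (PySem.List.pyRange 0 (n - 1) 1).foldl (fun st i => G st (i + 1)) init
      = (PySem.List.pyRange 1 n 1).foldl G init := by
  rw [PySem.List.pyRange_one, PySem.List.pyRange_one]
  simp only [List.foldl_map]
  have h : n - 1 - 0 = n - 1 := by ring
  rw [h]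
  congr 1
  funext st k
  congr 1
  ring

-- A's interleaved loop, finished with the trailing clamp, is pvRun
lemma pvFoldA_run (L e : Int) :
    ∀ (t : List (List Int)) (acc : List (List Int)) (cur : List Int),
      (t.foldl (pvStepA L e) (acc, cur)).1
        ++ [pvClampA L e (t.foldl (pvStepA L e) (acc, cur)).2]
      = acc ++ pvRun L e cur t := by
  intro t
  induction t with
  | nil => intro acc cur; simp [pvRun]
  | cons r t ih =>
    intro acc cur
    simp only [List.foldl_cons, pvRun]
    by_cases hc : PySem.List.pyGetD r 0 0 - PySem.List.pyGetD cur 1 0 ≤ e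
    · rw [show pvStepA L e (acc, cur) r = (acc, cur.set 1 (PySem.List.pyGetD r 1 0)) by
        unfold pvStepA; simp [hc]]
      rw [ih, if_pos hc]
    · rw [show pvStepA L e (acc, cur) r = (acc ++ [pvClampA L e cur], r) by
        unfold pvStepA; simp [hc]]
      rw [ih, if_neg hc]
      simp

-- the key invariant: pvRun from an open interval cur equals B's groups of (cur :: t), clamped
lemma pvRun_groups (L e : Int) :
    ∀ (t : List (List Int)) (cur : List Int), 2 ≤ cur.length → (∀ x ∈ t, 2 ≤ x.length) →
      pvRun L e cur t = (pvGroups e (cur :: t)).map (pvOutG L e) := by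
  intro t
  induction t with
  | nil =>
    intro cur _ _
    rw [show pvRun L e cur [] = [pvClampA L e cur] from rfl, pvGroups_cons]
    simp [pvGroups_nil, pvClampA_out]
  | cons r t ih =>
    intro cur hcur hall
    have hr : 2 ≤ r.length := hall r (by simp)
    have hall' : ∀ x ∈ t, 2 ≤ x.length := fun x hx => hall x (by simp [hx])
    by_cases hc : PySem.List.pyGetD r 0 0 - PySem.List.pyGetD cur 1 0 ≤ e
    · -- merge: cur's end becomes r's end; grouping glues r into cur's group
      have h1 : PySem.List.pyGetD (cur.set 1 (PySem.List.pyGetD r 1 0)) 1 0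
          = PySem.List.pyGetD r 1 0 := pvGetD_set_one cur _ hcur
      have hchain : pvChain e (cur.set 1 (PySem.List.pyGetD r 1 0)) t = pvChain e r t :=
        pvChain_congr e _ r t h1
      rw [pvRun_cons, if_pos hc]
      rw [ih _ (by simpa using hcur) hall']
      rw [show pvGroups e (cur :: r :: t)
            = (cur :: r :: t.take (pvChain e r t)) :: pvGroups e (t.drop (pvChain e r t)) by
          rw [pvGroups_cons]; simp [pvChain, hc]]
      rw [show pvGroups e (cur.set 1 (PySem.List.pyGetD r 1 0) :: t)
            = (cur.set 1 (PySem.List.pyGetD r 1 0) :: t.take (pvChain e r t))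
                :: pvGroups e (t.drop (pvChain e r t)) by
          rw [pvGroups_cons, hchain]]
      simp only [List.map_cons, List.cons.injEq, and_true]
      -- outputs of the two first groups agree: same head start, same last end
      unfold pvOutG
      cases htk : t.take (pvChain e r t) with
      | nil =>
        simp only [PySem.List.pyGetD_zero_cons, pvGetD_set_zero]
        have ha : PySem.List.pyGetD [cur.set 1 (PySem.List.pyGetD r 1 0)] (-1) ([] : List Int)
            = cur.set 1 (PySem.List.pyGetD r 1 0) := rfl
        have hb : PySem.List.pyGetD [r] (-1) ([] : List Int) = r := rfl
        rw [ha, pvLast_cons cur [r] (by simp), hb, h1]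
      | cons x xs =>
        simp only [PySem.List.pyGetD_zero_cons, pvGetD_set_zero]
        rw [pvLast_cons _ (x :: xs) (by simp), pvLast_cons cur (r :: x :: xs) (by simp),
            pvLast_cons r (x :: xs) (by simp)]
    · -- break: cur's group is closed as a singleton
      rw [pvRun_cons, if_neg hc]
      rw [ih r hr hall']
      rw [show pvGroups e (cur :: r :: t) = [cur] :: pvGroups e (r :: t) by
          rw [pvGroups_cons]; simp [pvChain, hc]]
      simp [pvClampA_out]

theorem exchange_regions_spec : Claim_equal_exchange_regions := by
  intro error_regions array_length extend_length _ hpre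
  unfold Spec_exchange_regions
  match error_regions with
  | [] =>
    show ([] : List (List Int)) = _
    simp [exchange_regions_alt, pvGroups_nil]
  | [r] =>
    show _ ++ [pvClampA array_length extend_length r] = _
    simp only [exchange_regions_alt, List.nil_append]
    rw [show pvGroups extend_length [r] = [[r]] by
          rw [pvGroups_cons]; simp [pvGroups_nil]]
    simp [pvClampA_out]
  | r0 :: r1 :: rest =>
    show (let st := (PySem.List.pyRange 0 (((r0 :: r1 :: rest).length : Int) - 1) 1).foldl
            (fun st i => pvStepA array_length extend_length st
                (PySem.List.pyGetD (r0 :: r1 :: rest) (i + 1) []))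
            ([], PySem.List.pyGetD (r0 :: r1 :: rest) 0 []);
          st.1 ++ [pvClampA array_length extend_length st.2]) = _
    rw [pvShift ((r0 :: r1 :: rest).length : Int)
          (fun st i => pvStepA array_length extend_length st (PySem.List.pyGetD (r0 :: r1 :: rest) i []))]
    rw [PySem.List.foldl_pyRange_pyGetD' (r0 :: r1 :: rest) [] _ _ (a := 1) (by norm_num)]
    simp only [PySem.List.pyGetD_zero_cons, Int.toNat_one, List.drop_succ_cons, List.drop_zero]
    rw [pvFoldA_run, pvRun_groups array_length extend_length (r1 :: rest) r0
          (hpre r0 (by simp)) (fun x hx => hpre x (by simp [hx]))]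
    rfl
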